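-- pv_equiv track=rewrite | github.com/aleonstamerhu/envcast | envcast/sorter.py | _grouped_sort
-- ===== SOURCE A (Python) =====
-- from typing import Dict, List, Optional
--
-- def _grouped_sort(keys: List[str], groups: List[str]) -> List[str]:
--     """Place keys whose names start with a group prefix first, then the rest."""
--     grouped: List[str] = []
--     remainder: List[str] = []
--
--     for key in sorted(keys, key=str.casefold):
--         if any(key.upper().startswith(g.upper()) for g in groups):
--             grouped.append(key)
--         else:
--             remainder.append(key)
--
--     return grouped + remainder
-- ===== SOURCE B (Python) =====
-- from typing import List
--
-- def _grouped_sort(keys: List[str], groups: List[str]) -> List[str]: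
--     """Place keys whose names start with a group prefix first, then the rest."""
--     prefixes = tuple(g.upper() for g in groups)
--     return sorted(keys, key=lambda k: (not k.upper().startswith(prefixes), k.casefold()))
-- ===== Notes on version B (the rewrite author's own statement) =====
-- stated objective: simpler
-- what changed: B replaces A's sort-then-partition-then-concatenate (three phases, two accumulator lists) by ONE stable sort under the composite key (not-matched flag, casefold), with the group prefixes uppercased once into a tuple for a single startswith call; there is no partition and no concatenation at all.
import Mathlib
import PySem

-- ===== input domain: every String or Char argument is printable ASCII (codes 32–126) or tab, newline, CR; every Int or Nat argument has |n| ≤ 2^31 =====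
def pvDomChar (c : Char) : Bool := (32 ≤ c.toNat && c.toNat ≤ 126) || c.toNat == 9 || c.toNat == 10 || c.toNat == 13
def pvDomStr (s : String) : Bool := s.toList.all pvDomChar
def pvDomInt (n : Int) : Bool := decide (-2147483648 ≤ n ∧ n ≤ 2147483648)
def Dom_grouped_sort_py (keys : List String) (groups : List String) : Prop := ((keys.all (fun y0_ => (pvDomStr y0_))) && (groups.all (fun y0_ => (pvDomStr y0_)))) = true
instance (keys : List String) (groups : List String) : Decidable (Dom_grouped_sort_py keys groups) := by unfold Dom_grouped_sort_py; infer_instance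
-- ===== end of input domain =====

-- B replaces A's sort-then-partition-then-concatenate by ONE stable sort under the composite key
-- (not-matched flag, casefold); same cost class, but shorter and with no partition or concatenation.
-- str.casefold is ported as PySem.Str.lower, exact on the ASCII input domain.

-- ===== PORT A =====
def grouped_sort_py (keys : List String) (groups : List String) : List String :=
  let pair := (PySem.List.sorted keys PySem.Str.lower false).foldl
    (fun (st : List String × List String) key =>
      if groups.any (fun g => PySem.Str.startswith (PySem.Str.upper key) (PySem.Str.upper g))
      then (st.1 ++ [key], st.2)
      else (st.1, st.2 ++ [key])) ([], [])
  pair.1 ++ pair.2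

-- ===== PORT B =====
-- one stable sort with the tuple key (not startswith(prefixes), casefold)
def grouped_sort_py_alt (keys : List String) (groups : List String) : List String :=
  let prefixes := groups.map PySem.Str.upper
  PySem.List.sorted2 keys
    (fun k => !(prefixes.any (fun p => PySem.Str.startswith (PySem.Str.upper k) p)))
    PySem.Str.lower false

-- ===== PRECONDITION & SPEC =====
def Spec_grouped_sort_py (keys : List String) (groups : List String) (out : List String) : Prop := out = grouped_sort_py_alt keys groups
instance (keys : List String) (groups : List String) (out : List String) : Decidable (Spec_grouped_sort_py keys groups out) := by unfold Spec_grouped_sort_py; infer_instance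

-- ===== CLAIM (what is proved, stated in full; the proofs are below) =====
def Claim_equal_grouped_sort_py : Prop := ∀ (keys : List String) (groups : List String), Dom_grouped_sort_py keys groups → Spec_grouped_sort_py keys groups (grouped_sort_py keys groups)

-- ===== LEMMAS AND PROOFS =====

-- A's loop over the sorted list is the pair of filters of the sorted list.
theorem pvFoldl_partition {α : Type} (q : α → Bool) (l : List α) (g r : List α) :
    l.foldl (fun (st : List α × List α) key =>
        if q key then (st.1 ++ [key], st.2) else (st.1, st.2 ++ [key])) (g, r)
      = (g ++ l.filter q, r ++ l.filter (fun k => !q k)) := by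
  induction l generalizing g r with
  | nil => simp
  | cons x xs ih =>
    by_cases hx : q x = true <;> simp [hx, ih]

-- insertBy keeps the list sorted.
theorem pvPairwise_insertBy {α κ : Type} [LinearOrder κ] (key : α → κ) (x : α) (ys : List α)
    (h : ys.Pairwise (fun a b => key a ≤ key b)) :
    (PySem.List.insertBy (fun a b => decide (key a < key b)) x ys).Pairwise
      (fun a b => key a ≤ key b) := by
  induction ys with
  | nil => simp [PySem.List.insertBy]
  | cons y ys ih =>
    rcases List.pairwise_cons.mp h with ⟨hy, ht⟩
    by_cases hlt : key x < key y
    · simp only [PySem.List.insertBy, hlt, decide_true, if_true]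
      refine List.pairwise_cons.mpr ⟨?_, h⟩
      intro b hb
      rcases List.mem_cons.mp hb with rfl | hb
      · exact le_of_lt hlt
      · exact le_trans (le_of_lt hlt) (hy b hb)
    · simp only [PySem.List.insertBy, hlt, decide_false, Bool.false_eq_true, if_false]
      refine List.pairwise_cons.mpr ⟨?_, ih ht⟩
      intro b hb
      rcases (PySem.List.mem_insertBy _ _ _ _).mp hb with rfl | hb
      · exact le_of_not_gt hlt
      · exact hy b hb

-- filtering commutes with one stable insertion into a sorted list.
theorem pvFilter_insertBy {α κ : Type} [LinearOrder κ] (key : α → κ) (p : α → Bool) (x : α)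
    (ys : List α) (h : ys.Pairwise (fun a b => key a ≤ key b)) :
    (PySem.List.insertBy (fun a b => decide (key a < key b)) x ys).filter p =
      if p x then PySem.List.insertBy (fun a b => decide (key a < key b)) x (ys.filter p)
      else ys.filter p := by
  induction ys with
  | nil =>
    by_cases hx : p x = true <;> simp [PySem.List.insertBy, hx]
  | cons y ys ih =>
    rcases List.pairwise_cons.mp h with ⟨hy, ht⟩
    by_cases hlt : key x < key y
    · rw [show PySem.List.insertBy (fun a b => decide (key a < key b)) x (y :: ys)
          = x :: y :: ys by simp [PySem.List.insertBy, hlt]]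
      by_cases hx : p x = true
      · rw [if_pos hx, List.filter_cons, if_pos hx]
        rcases hfy : List.filter p (y :: ys) with _ | ⟨z, zs⟩
        · simp [PySem.List.insertBy]
        · have hz : z ∈ y :: ys := List.mem_of_mem_filter (by rw [hfy]; exact List.mem_cons_self ..)
          have hxz : key x < key z := by
            rcases List.mem_cons.mp hz with rfl | hz'
            · exact hlt
            · exact lt_of_lt_of_le hlt (hy z hz')
          simp [PySem.List.insertBy, hxz]
      · rw [if_neg hx, List.filter_cons, if_neg hx]
    · rw [show PySem.List.insertBy (fun a b => decide (key a < key b)) x (y :: ys)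
          = y :: PySem.List.insertBy (fun a b => decide (key a < key b)) x ys by
            simp [PySem.List.insertBy, hlt]]
      by_cases hx : p x = true <;> by_cases hpy : p y = true <;>
        simp [hx, hpy, ih ht, PySem.List.insertBy, hlt]

-- filtering commutes with the whole insertion-sort fold.
theorem pvFilter_foldl {α κ : Type} [LinearOrder κ] (key : α → κ) (p : α → Bool)
    (xs : List α) : ∀ (acc : List α), acc.Pairwise (fun a b => key a ≤ key b) →
    (xs.foldl (fun acc x => PySem.List.insertBy (fun a b => decide (key a < key b)) x acc) acc).filter p
      = (xs.filter p).foldl (fun acc x => PySem.List.insertBy (fun a b => decide (key a < key b)) x acc) (acc.filter p) := by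
  induction xs with
  | nil => intro acc _; simp
  | cons x xs ih =>
    intro acc hacc
    simp only [List.foldl_cons, List.filter_cons]
    rw [ih _ (pvPairwise_insertBy key x acc hacc), pvFilter_insertBy key p x acc hacc]
    by_cases hx : p x = true <;> simp [hx]

-- stable sort commutes with filter.
theorem pvFilter_sorted {α κ : Type} [LinearOrder κ] (key : α → κ) (p : α → Bool) (xs : List α) :
    (PySem.List.sorted xs key false).filter p = PySem.List.sorted (xs.filter p) key false := by
  rw [show (PySem.List.sorted xs key false) = PySem.List.sorted xs key from rfl,
    show (PySem.List.sorted (xs.filter p) key false) = PySem.List.sorted (xs.filter p) key from rfl,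
    PySem.List.sorted_eq_foldl_insertBy, PySem.List.sorted_eq_foldl_insertBy]
  simpa using pvFilter_foldl key p xs [] (List.Pairwise.nil)

-- the tuple-key comparison of sorted2 with k1 = (!p ·)
def pvLt2 {α κ : Type} [LT κ] [DecidableLT κ] (p : α → Bool) (key : α → κ) (a b : α) : Bool :=
  decide ((!p a) < (!p b)) || (!decide ((!p b) < (!p a)) && decide (key a < key b))

theorem pvSorted2_eq_foldl {α κ : Type} [LT κ] [DecidableLT κ] (p : α → Bool) (key : α → κ)
    (xs : List α) :
    PySem.List.sorted2 xs (fun k => !p k) key false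
      = xs.foldl (fun acc x => PySem.List.insertBy (pvLt2 p key) x acc) [] := rfl

-- pvLt2 x y is false when p x = false and p y = true: such x passes over the matched block.
theorem pvInsert2_pass {α κ : Type} [LT κ] [DecidableLT κ] (p : α → Bool) (key : α → κ)
    (x : α) (hx : p x = false) (g r : List α) (hg : ∀ y ∈ g, p y = true) :
    PySem.List.insertBy (pvLt2 p key) x (g ++ r)
      = g ++ PySem.List.insertBy (pvLt2 p key) x r := by
  induction g with
  | nil => simp
  | cons z g ih =>
    have hz : p z = true := hg z (List.mem_cons_self ..)
    have : pvLt2 p key x z = false := by simp [pvLt2, hx, hz]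
    simp only [List.cons_append, PySem.List.insertBy, this, Bool.false_eq_true, if_false]
    rw [ih (fun y hy => hg y (List.mem_cons_of_mem _ hy))]

-- inside a block of equal flags, pvLt2 is the plain key comparison.
theorem pvInsert2_block {α κ : Type} [LT κ] [DecidableLT κ] (p : α → Bool) (key : α → κ)
    (x : α) (b : Bool) (hx : p x = b) (r : List α) (hr : ∀ y ∈ r, p y = b) :
    PySem.List.insertBy (pvLt2 p key) x r
      = PySem.List.insertBy (fun a b => decide (key a < key b)) x r := by
  induction r with
  | nil => rfl
  | cons y ys ih =>
    have hy : p y = b := hr y (List.mem_cons_self ..)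
    have : pvLt2 p key x y = decide (key x < key y) := by
      cases b <;> simp_all [pvLt2]
    simp only [PySem.List.insertBy, this]
    by_cases hk : decide (key x < key y) = true <;>
      simp [hk, ih (fun y hy => hr y (List.mem_cons_of_mem _ hy))]

-- a matched x is inserted within the matched block, before the whole unmatched block.
theorem pvInsert2_hit {α κ : Type} [LT κ] [DecidableLT κ] (p : α → Bool) (key : α → κ)
    (x : α) (hx : p x = true) (g r : List α) (hg : ∀ y ∈ g, p y = true)
    (hr : ∀ y ∈ r, p y = false) :
    PySem.List.insertBy (pvLt2 p key) x (g ++ r)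
      = PySem.List.insertBy (fun a b => decide (key a < key b)) x g ++ r := by
  induction g with
  | nil =>
    cases r with
    | nil => rfl
    | cons y ys =>
      have hy : p y = false := hr y (List.mem_cons_self ..)
      have : pvLt2 p key x y = true := by simp [pvLt2, hx, hy]
      simp [PySem.List.insertBy, this]
  | cons z g ih =>
    have hz : p z = true := hg z (List.mem_cons_self ..)
    have : pvLt2 p key x z = decide (key x < key z) := by simp [pvLt2, hx, hz]
    simp only [List.cons_append, PySem.List.insertBy, this]
    by_cases hk : decide (key x < key z) = true <;>
      simp [hk, ih (fun y hy => hg y (List.mem_cons_of_mem _ hy))]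

-- appending one element to the input of sorted is one insertion into its output.
theorem pvSorted_append_one {α κ : Type} [LT κ] [DecidableLT κ] (key : α → κ)
    (xs : List α) (x : α) :
    PySem.List.sorted (xs ++ [x]) key false
      = PySem.List.insertBy (fun a b => decide (key a < key b)) x (PySem.List.sorted xs key false) := by
  rw [show (PySem.List.sorted (xs ++ [x]) key false) = PySem.List.sorted (xs ++ [x]) key from rfl,
    show (PySem.List.sorted xs key false) = PySem.List.sorted xs key from rfl,
    PySem.List.sorted_eq_foldl_insertBy, PySem.List.sorted_eq_foldl_insertBy, List.foldl_append]
  rfl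

-- MAIN: the composite-key sort is the matched-filter sort followed by the unmatched-filter sort.
theorem pvSorted2_split {α κ : Type} [LinearOrder κ] (p : α → Bool) (key : α → κ) (xs : List α) :
    PySem.List.sorted2 xs (fun k => !p k) key false
      = PySem.List.sorted (xs.filter p) key false
        ++ PySem.List.sorted (xs.filter (fun k => !p k)) key false := by
  induction xs using List.reverseRecOn with
  | nil => rfl
  | append_singleton xs x ih =>
    have hg : ∀ y ∈ PySem.List.sorted (xs.filter p) key false, p y = true := by
      intro y hy
      exact List.of_mem_filter ((PySem.List.mem_sorted ..).mp hy)
    have hr : ∀ y ∈ PySem.List.sorted (xs.filter (fun k => !p k)) key false, p y = false := by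
      intro y hy
      have := List.of_mem_filter ((PySem.List.mem_sorted ..).mp hy)
      simpa using this
    rw [pvSorted2_eq_foldl, List.foldl_append, ← pvSorted2_eq_foldl, ih]
    simp only [List.foldl_cons, List.foldl_nil, List.filter_append, List.filter_cons,
      List.filter_nil]
    by_cases hx : p x = true
    · rw [pvInsert2_hit p key x hx _ _ hg hr, ← pvSorted_append_one]
      simp [hx]
    · have hx' : p x = false := by simpa using hx
      rw [pvInsert2_pass p key x hx' _ _ hg,
        pvInsert2_block p key x false hx' _ hr, ← pvSorted_append_one]
      simp [hx']

-- ===== VERDICT (by name: the statement is the Claim_ definition above) =====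
theorem grouped_sort_py_spec : Claim_equal_grouped_sort_py := by
  intro keys groups _
  show grouped_sort_py keys groups = grouped_sort_py_alt keys groups
  simp only [grouped_sort_py, grouped_sort_py_alt]
  rw [pvFoldl_partition]
  simp only [List.nil_append, List.any_map, Function.comp_def]
  rw [pvFilter_sorted, pvFilter_sorted,
    pvSorted2_split (fun k => groups.any fun g => PySem.Str.startswith (PySem.Str.upper k) (PySem.Str.upper g)) PySem.Str.lower keys]
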